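-- pv_equiv track=rewrite | github.com/razon1494/sql-query-feedback-system | backend/sql_parser.py | _find_top_level_keyword
-- ===== SOURCE A (Python) =====
-- def _find_top_level_keyword(upper_sql: str, keyword: str) -> int:
--     """Find first occurrence of keyword at depth 0."""
--     depth = 0
--     kw = keyword.upper()
--     i = 0
--     while i < len(upper_sql):
--         ch = upper_sql[i]
--         if ch == '(':
--             depth += 1
--         elif ch == ')':
--             depth -= 1
--         elif depth == 0 and upper_sql[i:i+len(kw)] == kw:
--             before = upper_sql[i-1] if i > 0 else ' '
--             after  = upper_sql[i+len(kw)] if i+len(kw) < len(upper_sql) else ' '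
--             if (not before.isalnum() and before != '_') and (not after.isalnum() and after != '_'):
--                 return i
--         i += 1
--     return -1
-- ===== SOURCE B (Python) =====
-- def _find_top_level_keyword(upper_sql: str, keyword: str) -> int:
--     """Find first occurrence of keyword at depth 0.
--
--     Instead of testing every index, precompute the parenthesis depth before
--     each position once, then jump between candidate occurrences with str.find.
--     """
--     kw = keyword.upper()
--     m = len(kw)
--     n = len(upper_sql)
--     depths = []
--     d = 0
--     for ch in upper_sql:
--         depths.append(d)
--         if ch == '(':
--             d += 1
--         elif ch == ')':
--             d -= 1
--     pos = upper_sql.find(kw)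
--     while pos != -1 and pos < n:
--         ch = upper_sql[pos]
--         if ch != '(' and ch != ')' and depths[pos] == 0:
--             before = upper_sql[pos - 1] if pos > 0 else ' '
--             after = upper_sql[pos + m] if pos + m < n else ' '
--             if (not before.isalnum() and before != '_') and (not after.isalnum() and after != '_'):
--                 return pos
--         pos = upper_sql.find(kw, pos + 1)
--     return -1
-- ===== Notes on version B (the rewrite author's own statement) =====
-- stated objective: faster
-- what changed: Replaced A's per-index scan (carrying depth and slicing a candidate substring at every position) by a one-pass prefix parenthesis-depth array plus str.find jumps that visit only actual occurrences of the keyword.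
import Mathlib
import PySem

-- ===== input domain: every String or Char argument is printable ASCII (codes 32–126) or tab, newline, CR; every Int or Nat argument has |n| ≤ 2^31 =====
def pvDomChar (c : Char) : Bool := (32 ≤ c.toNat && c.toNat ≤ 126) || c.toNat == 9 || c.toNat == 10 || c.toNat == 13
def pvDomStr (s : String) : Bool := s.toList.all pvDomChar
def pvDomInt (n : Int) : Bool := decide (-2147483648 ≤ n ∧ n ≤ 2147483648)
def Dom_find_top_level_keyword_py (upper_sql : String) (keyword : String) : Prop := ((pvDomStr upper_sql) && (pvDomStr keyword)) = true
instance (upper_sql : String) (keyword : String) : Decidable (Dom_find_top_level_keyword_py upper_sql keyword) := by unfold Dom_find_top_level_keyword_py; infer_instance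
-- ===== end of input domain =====

-- B replaces A's char-by-char depth-carrying scan by a prefix-depth array plus str.find jumps
-- between candidate occurrences; same return value everywhere (equivalence proved below).

-- ===== PORT A =====
-- literal transliteration of A's while loop; `depth` and `i` are the loop state.
-- (str.isalnum on a single char is PySem.Chars.isalnum — exact on the ASCII domain.)
def ftlkA_go (cs kw : List Char) (depth : Int) (i : Nat) : Int :=
  if h : i < cs.length then
    let ch := PySem.List.pyGetD cs (i : Int) ' '
    if ch = '(' then
      ftlkA_go cs kw (depth + 1) (i + 1)
    else if ch = ')' then
      ftlkA_go cs kw (depth - 1) (i + 1)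
    else if depth = 0 ∧ PySem.List.slice cs (some (i : Int)) (some ((i : Int) + (kw.length : Int))) = kw then
      let before := if 0 < i then PySem.List.pyGetD cs ((i : Int) - 1) ' ' else ' '
      let after := if i + kw.length < cs.length then PySem.List.pyGetD cs ((i : Int) + (kw.length : Int)) ' ' else ' '
      if (¬ PySem.Chars.isalnum before = true ∧ before ≠ '_') ∧
         (¬ PySem.Chars.isalnum after = true ∧ after ≠ '_') then
        (i : Int)
      else
        ftlkA_go cs kw depth (i + 1)
    else
      ftlkA_go cs kw depth (i + 1)
  else
    -1
termination_by cs.length - i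

def find_top_level_keyword_py (upper_sql : String) (keyword : String) : Int :=
  ftlkA_go upper_sql.toList (PySem.Chars.upper keyword.toList) 0 0

-- ===== PORT B =====
-- literal transliteration of Source B's while loop over str.find candidates; `fuel = n + 1`
-- is a termination device only: `pos` strictly increases, so the loop runs ≤ n + 1 times.
def ftlkB_go (cs kw : List Char) (depths : List Int) (m n : Nat) (fuel : Nat) (pos : Int) : Int :=
  match fuel with
  | 0 => -1
  | fuel + 1 =>
    if pos ≠ -1 ∧ pos < (n : Int) then
      let ch := PySem.List.pyGetD cs pos ' '
      if ch ≠ '(' ∧ ch ≠ ')' ∧ PySem.List.pyGetD depths pos 0 = 0 then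
        let before := if 0 < pos then PySem.List.pyGetD cs (pos - 1) ' ' else ' '
        let after := if pos + (m : Int) < (n : Int) then PySem.List.pyGetD cs (pos + (m : Int)) ' ' else ' '
        if (¬ PySem.Chars.isalnum before = true ∧ before ≠ '_') ∧
           (¬ PySem.Chars.isalnum after = true ∧ after ≠ '_') then
          pos
        else
          ftlkB_go cs kw depths m n fuel (PySem.Chars.findFrom cs kw (pos + 1) none)
      else
        ftlkB_go cs kw depths m n fuel (PySem.Chars.findFrom cs kw (pos + 1) none)
    else
      -1

def find_top_level_keyword_py_alt (upper_sql : String) (keyword : String) : Int :=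
  let cs := upper_sql.toList
  let kw := PySem.Chars.upper keyword.toList
  let m := kw.length
  let n := cs.length
  let depths := (cs.foldl
      (fun (p : List Int × Int) ch =>
        (p.1 ++ [p.2], if ch = '(' then p.2 + 1 else if ch = ')' then p.2 - 1 else p.2))
      ([], 0)).1
  ftlkB_go cs kw depths m n (n + 1) (PySem.Chars.find cs kw)

-- ===== PRECONDITION & SPEC =====
def Spec_find_top_level_keyword_py (upper_sql : String) (keyword : String) (out : Int) : Prop := out = find_top_level_keyword_py_alt upper_sql keyword
instance (upper_sql : String) (keyword : String) (out : Int) : Decidable (Spec_find_top_level_keyword_py upper_sql keyword out) := by unfold Spec_find_top_level_keyword_py; infer_instance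

-- ===== CLAIM (what is proved, stated in full; the proofs are below) =====
def Claim_equal_find_top_level_keyword_py : Prop := ∀ (upper_sql : String) (keyword : String), Dom_find_top_level_keyword_py upper_sql keyword → Spec_find_top_level_keyword_py upper_sql keyword (find_top_level_keyword_py upper_sql keyword)

-- ===== LEMMAS AND PROOFS =====

-- parenthesis-depth step and prefix depth before position i
def pvStep (d : Int) (c : Char) : Int := if c = '(' then d + 1 else if c = ')' then d - 1 else d

def pvDepthAt (cs : List Char) (i : Nat) : Int := (cs.take i).foldl pvStep 0

def pvBnd (c : Char) : Bool := !PySem.Chars.isalnum c && c != '_'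

-- the common characterisation: position i is a top-level, word-bounded occurrence of kw
def pvCond (cs kw : List Char) (i : Nat) : Bool :=
  (cs.getD i ' ' != '(') && (cs.getD i ' ' != ')') && (pvDepthAt cs i == 0) &&
  decide (kw <+: cs.drop i) &&
  pvBnd (if 0 < i then cs.getD (i - 1) ' ' else ' ') &&
  pvBnd (if i + kw.length < cs.length then cs.getD (i + kw.length) ' ' else ' ')

def pvFirstFrom (cs kw : List Char) (i : Nat) : Int :=
  if h : i < cs.length then
    if pvCond cs kw i then (i : Int) else pvFirstFrom cs kw (i + 1)
  else -1
termination_by cs.length - i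

theorem pvFirstFrom_ge (cs kw : List Char) (i : Nat) (h : cs.length ≤ i) :
    pvFirstFrom cs kw i = -1 := by
  rw [pvFirstFrom]; simp [Nat.not_lt.mpr h]

theorem pvFirstFrom_step (cs kw : List Char) (i : Nat) (h : pvCond cs kw i = false) :
    pvFirstFrom cs kw i = pvFirstFrom cs kw (i + 1) := by
  by_cases hi : i < cs.length
  · rw [pvFirstFrom]; simp [hi, h]
  · rw [pvFirstFrom_ge cs kw i (by omega), pvFirstFrom_ge cs kw (i + 1) (by omega)]

theorem pvFirstFrom_congr (cs kw : List Char) (i p : Nat) (hip : i ≤ p)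
    (h : ∀ j, i ≤ j → j < p → pvCond cs kw j = false) :
    pvFirstFrom cs kw i = pvFirstFrom cs kw p := by
  induction p with
  | zero => cases Nat.le_zero.mp hip; rfl
  | succ q ih =>
    rcases Nat.lt_or_ge i (q + 1) with hlt | hge
    · have hiq : i ≤ q := by omega
      rw [ih hiq (fun j hj hjq => h j hj (by omega))]
      exact pvFirstFrom_step cs kw q (h q hiq (by omega))
    · cases le_antisymm hip hge; rfl

theorem pvFirstFrom_of_none (cs kw : List Char) (i : Nat)
    (h : ∀ j, i ≤ j → pvCond cs kw j = false) :
    pvFirstFrom cs kw i = -1 := by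
  rcases Nat.le_total i cs.length with hi | hi
  · rw [pvFirstFrom_congr cs kw i cs.length hi (fun j hj _ => h j hj)]
    exact pvFirstFrom_ge cs kw cs.length le_rfl
  · exact pvFirstFrom_ge cs kw i hi

-- depth bookkeeping
theorem pvDepthAt_zero (cs : List Char) : pvDepthAt cs 0 = 0 := rfl

theorem foldl_pvStep_add (l : List Char) (d : Int) :
    l.foldl pvStep d = d + l.foldl pvStep 0 := by
  induction l generalizing d with
  | nil => simp
  | cons c t ih =>
    simp only [List.foldl_cons]
    rw [ih (pvStep d c), ih (pvStep 0 c)]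
    unfold pvStep; split_ifs <;> ring

theorem pvDepthAt_succ (cs : List Char) (i : Nat) (h : i < cs.length) :
    pvDepthAt cs (i + 1) = pvStep (pvDepthAt cs i) (cs.getD i ' ') := by
  unfold pvDepthAt
  rw [List.take_add_one]
  have : cs[i]? = some cs[i] := List.getElem?_eq_getElem h
  simp only [this, Option.toList_some, List.foldl_append, List.foldl_cons, List.foldl_nil]
  rw [List.getD_eq_getElem cs ' ' h]

-- additivity of the depth step and the cons form of pvDepthAt
theorem pvStep_add (d : Int) (c : Char) : pvStep d c = d + pvStep 0 c := by
  unfold pvStep; split_ifs <;> ring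

theorem pvDepthAt_cons_succ (c : Char) (t : List Char) (i : Nat) :
    pvDepthAt (c :: t) (i + 1) = pvStep 0 c + pvDepthAt t i := by
  unfold pvDepthAt
  rw [List.take_succ_cons, List.foldl_cons, foldl_pvStep_add]

-- the depths list built by B's first loop
theorem pvDepths_foldl (cs : List Char) (acc : List Int) (d : Int) :
    (cs.foldl
      (fun (p : List Int × Int) ch =>
        (p.1 ++ [p.2], if ch = '(' then p.2 + 1 else if ch = ')' then p.2 - 1 else p.2))
      (acc, d)).1
    = acc ++ (List.range cs.length).map (fun i => d + pvDepthAt cs i) := by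
  induction cs generalizing acc d with
  | nil => simp
  | cons c t ih =>
    simp only [List.foldl_cons]
    have hstep : (if c = '(' then d + 1 else if c = ')' then d - 1 else d) = pvStep d c := rfl
    rw [hstep, ih]
    rw [List.length_cons, List.range_succ_eq_map, List.map_cons, List.map_map]
    have h0 : d + pvDepthAt (c :: t) 0 = d := by simp [pvDepthAt]
    have hmap : (List.range t.length).map ((fun i => d + pvDepthAt (c :: t) i) ∘ Nat.succ)
        = (List.range t.length).map (fun i => pvStep d c + pvDepthAt t i) := by
      refine List.map_congr_left (fun i _ => ?_)
      simp only [Function.comp_apply]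
      rw [Nat.succ_eq_add_one, pvDepthAt_cons_succ, pvStep_add d c]
      ring
    rw [h0, hmap, List.append_assoc]
    rfl

-- bridge for the boundary characters (Int index rewritten to the Nat form)
theorem pvBefore_eq (cs : List Char) (i : Nat) :
    (if 0 < i then PySem.List.pyGetD cs ((i : Int) - 1) ' ' else ' ')
      = (if 0 < i then cs.getD (i - 1) ' ' else ' ') := by
  by_cases h : 0 < i
  · have h2 : (i : Int) - 1 = ((i - 1 : Nat) : Int) := by omega
    rw [if_pos h, if_pos h, h2, PySem.List.pyGetD_natCast]
  · rw [if_neg h, if_neg h]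

theorem pvAfter_idx (cs : List Char) (i m : Nat) :
    PySem.List.pyGetD cs ((i : Int) + (m : Int)) ' ' = cs.getD (i + m) ' ' := by
  have h : (i : Int) + (m : Int) = ((i + m : Nat) : Int) := by push_cast; ring
  rw [h, PySem.List.pyGetD_natCast]

theorem pvBnd_iff (c : Char) : pvBnd c = true ↔ (¬ PySem.Chars.isalnum c = true ∧ c ≠ '_') := by
  simp [pvBnd]

theorem pvCond_iff (cs kw : List Char) (i : Nat) :
    pvCond cs kw i = true ↔
      (cs.getD i ' ' ≠ '(' ∧ cs.getD i ' ' ≠ ')' ∧ pvDepthAt cs i = 0 ∧ kw <+: cs.drop i ∧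
       pvBnd (if 0 < i then cs.getD (i - 1) ' ' else ' ') = true ∧
       pvBnd (if i + kw.length < cs.length then cs.getD (i + kw.length) ' ' else ' ') = true) := by
  simp [pvCond, and_assoc]

theorem pvCond_false (cs kw : List Char) (i : Nat)
    (hn : ¬ (cs.getD i ' ' ≠ '(' ∧ cs.getD i ' ' ≠ ')' ∧ pvDepthAt cs i = 0 ∧ kw <+: cs.drop i ∧
       pvBnd (if 0 < i then cs.getD (i - 1) ' ' else ' ') = true ∧
       pvBnd (if i + kw.length < cs.length then cs.getD (i + kw.length) ' ' else ' ') = true)) :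
    pvCond cs kw i = false := by
  rw [Bool.eq_false_iff]
  exact fun h => hn ((pvCond_iff cs kw i).mp h)

-- A's loop computes pvFirstFrom
theorem ftlkA_go_eq (cs kw : List Char) (fuel : Nat) :
    ∀ i, cs.length - i ≤ fuel → ftlkA_go cs kw (pvDepthAt cs i) i = pvFirstFrom cs kw i := by
  induction fuel with
  | zero =>
    intro i hi
    have h : ¬ i < cs.length := by omega
    rw [ftlkA_go, pvFirstFrom]; simp [h]
  | succ f ih =>
    intro i hi
    by_cases h : i < cs.length
    · have hd1 := pvDepthAt_succ cs i h
      rw [ftlkA_go]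
      simp only [h, dif_pos, PySem.List.pyGetD_natCast]
      by_cases h1 : cs.getD i ' ' = '('
      · rw [if_pos h1]
        have hdd : pvDepthAt cs i + 1 = pvDepthAt cs (i + 1) := by rw [hd1, h1]; rfl
        rw [hdd, ih (i + 1) (by omega),
          pvFirstFrom_step cs kw i (pvCond_false cs kw i (fun hc => hc.1 h1))]
      · rw [if_neg h1]
        by_cases h2 : cs.getD i ' ' = ')'
        · rw [if_pos h2]
          have hdd : pvDepthAt cs i - 1 = pvDepthAt cs (i + 1) := by
            rw [hd1, h2]; unfold pvStep; rw [if_neg (by decide), if_pos rfl]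
          rw [hdd, ih (i + 1) (by omega),
            pvFirstFrom_step cs kw i (pvCond_false cs kw i (fun hc => hc.2.1 h2))]
        · rw [if_neg h2]
          have hdsame : pvDepthAt cs (i + 1) = pvDepthAt cs i := by
            rw [hd1]; unfold pvStep; rw [if_neg h1, if_neg h2]
          have hsl : (PySem.List.slice cs (some (i : Int)) (some ((i : Int) + (kw.length : Int))) = kw)
              ↔ kw <+: cs.drop i := by
            rw [PySem.List.slice_natCast_add, eq_comm, ← List.prefix_iff_eq_take]
          by_cases h3 : pvDepthAt cs i = 0 ∧ PySem.List.slice cs (some (i : Int)) (some ((i : Int) + (kw.length : Int))) = kw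
          · rw [if_pos h3]
            rw [pvBefore_eq, pvAfter_idx]
            by_cases h4 : pvBnd (if 0 < i then cs.getD (i - 1) ' ' else ' ') = true
                ∧ pvBnd (if i + kw.length < cs.length then cs.getD (i + kw.length) ' ' else ' ') = true
            · rw [if_pos ⟨(pvBnd_iff _).mp h4.1, (pvBnd_iff _).mp h4.2⟩]
              have hc : pvCond cs kw i = true :=
                (pvCond_iff cs kw i).mpr ⟨h1, h2, h3.1, hsl.mp h3.2, h4.1, h4.2⟩
              rw [pvFirstFrom]; simp [h, hc]
            · rw [if_neg (fun hx => h4 ⟨(pvBnd_iff _).mpr hx.1, (pvBnd_iff _).mpr hx.2⟩)]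
              have hc : pvCond cs kw i = false :=
                pvCond_false cs kw i (fun hcc => h4 ⟨hcc.2.2.2.2.1, hcc.2.2.2.2.2⟩)
              rw [← hdsame, ih (i + 1) (by omega), pvFirstFrom_step cs kw i hc]
          · rw [if_neg h3]
            have hc : pvCond cs kw i = false :=
              pvCond_false cs kw i (fun hcc => h3 ⟨hcc.2.2.1, hsl.mpr hcc.2.2.2.1⟩)
            rw [← hdsame, ih (i + 1) (by omega), pvFirstFrom_step cs kw i hc]
    · rw [ftlkA_go, pvFirstFrom]; simp [h]

-- B's loop computes pvFirstFrom
theorem ftlkB_go_eq (cs kw : List Char) (fuel : Nat) :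
    ∀ k, k ≤ cs.length → cs.length - k < fuel →
    ftlkB_go cs kw ((List.range cs.length).map (fun i => pvDepthAt cs i)) kw.length cs.length fuel
        (PySem.Chars.findFrom cs kw (k : Int) none)
    = pvFirstFrom cs kw k := by
  induction fuel with
  | zero => intro k _ hfuel; omega
  | succ f ih =>
    intro k hk hfuel
    by_cases hneg : PySem.Chars.findFrom cs kw (k : Int) none = -1
    · rw [ftlkB_go]
      simp only [hneg]
      have hninf : ¬ kw <:+: cs.drop k :=
        (PySem.Chars.findFrom_natCast_eq_neg_one_iff cs kw k hk).mp hneg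
      rw [pvFirstFrom_of_none cs kw k (fun j hj => ?_)]
      · simp
      · refine pvCond_false cs kw j (fun hc => hninf ?_)
        have hdj : cs.drop j = (cs.drop k).drop (j - k) := by
          rw [List.drop_drop]; congr 1; omega
        exact (hc.2.2.2.1.isInfix).trans
          ((hdj ▸ (List.drop_suffix (j - k) (cs.drop k)) : cs.drop j <:+ cs.drop k).isInfix)
    · obtain ⟨hkle, hpre, hmin⟩ := PySem.Chars.findFrom_natCast_spec cs kw k hk hneg
      set pos := PySem.Chars.findFrom cs kw (k : Int) none with hposdef
      have hpos0 : (0 : Int) ≤ pos := le_trans (by omega) hkle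
      have hkj : k ≤ pos.toNat := by omega
      have hcongr : pvFirstFrom cs kw k = pvFirstFrom cs kw pos.toNat :=
        pvFirstFrom_congr cs kw k pos.toNat hkj (fun l hl hlj =>
          pvCond_false cs kw l (fun hc => (hmin l hl hlj) hc.2.2.2.1))
      by_cases hlt : pos < (cs.length : Int)
      · have hj : pos.toNat < cs.length := by omega
        have hposj : pos = ((pos.toNat : Nat) : Int) := by omega
        rw [ftlkB_go, if_pos ⟨hneg, hlt⟩]
        have hdep : PySem.List.pyGetD ((List.range cs.length).map (fun i => pvDepthAt cs i)) pos 0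
            = pvDepthAt cs pos.toNat := by
          rw [hposj, PySem.List.pyGetD_natCast, List.getD_eq_getElem _ _ (by simpa using hj)]
          simp
          congr 1
          omega
        have hch : PySem.List.pyGetD cs pos ' ' = cs.getD pos.toNat ' ' := by
          rw [hposj, PySem.List.pyGetD_natCast]; congr 2
        by_cases hc1 : cs.getD pos.toNat ' ' ≠ '(' ∧ cs.getD pos.toNat ' ' ≠ ')'
            ∧ pvDepthAt cs pos.toNat = 0
        · rw [if_pos (by rw [hch, hdep]; exact hc1)]
          have hb : (if 0 < pos then PySem.List.pyGetD cs (pos - 1) ' ' else ' ')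
              = (if 0 < pos.toNat then cs.getD (pos.toNat - 1) ' ' else ' ') := by
            by_cases h0 : 0 < pos.toNat
            · rw [if_pos (by omega), if_pos h0,
                (by omega : pos - 1 = ((pos.toNat - 1 : Nat) : Int)), PySem.List.pyGetD_natCast]
            · rw [if_neg (by omega), if_neg h0]
          have ha : (if pos + (kw.length : Int) < (cs.length : Int) then PySem.List.pyGetD cs (pos + (kw.length : Int)) ' ' else ' ')
              = (if pos.toNat + kw.length < cs.length then cs.getD (pos.toNat + kw.length) ' ' else ' ') := by
            by_cases hg : pos.toNat + kw.length < cs.length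
            · rw [if_pos (by omega), if_pos hg, hposj, pvAfter_idx]; congr 2
            · rw [if_neg (by omega), if_neg hg]
          rw [hb, ha]
          by_cases h4 : pvBnd (if 0 < pos.toNat then cs.getD (pos.toNat - 1) ' ' else ' ') = true
              ∧ pvBnd (if pos.toNat + kw.length < cs.length then cs.getD (pos.toNat + kw.length) ' ' else ' ') = true
          · rw [if_pos ⟨(pvBnd_iff _).mp h4.1, (pvBnd_iff _).mp h4.2⟩]
            have hc : pvCond cs kw pos.toNat = true :=
              (pvCond_iff cs kw pos.toNat).mpr ⟨hc1.1, hc1.2.1, hc1.2.2, hpre, h4.1, h4.2⟩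
            rw [hcongr, pvFirstFrom, dif_pos hj, if_pos hc]
            exact hposj
          · rw [if_neg (fun hx => h4 ⟨(pvBnd_iff _).mpr hx.1, (pvBnd_iff _).mpr hx.2⟩)]
            have hc : pvCond cs kw pos.toNat = false :=
              pvCond_false cs kw pos.toNat (fun hcc => h4 ⟨hcc.2.2.2.2.1, hcc.2.2.2.2.2⟩)
            have hnext : pos + 1 = ((pos.toNat + 1 : Nat) : Int) := by omega
            rw [hnext, ih (pos.toNat + 1) (by omega) (by omega),
              hcongr, pvFirstFrom_step cs kw pos.toNat hc]
        · rw [if_neg (by rw [hch, hdep]; exact hc1)]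
          have hc : pvCond cs kw pos.toNat = false :=
            pvCond_false cs kw pos.toNat (fun hcc => hc1 ⟨hcc.1, hcc.2.1, hcc.2.2.1⟩)
          have hnext : pos + 1 = ((pos.toNat + 1 : Nat) : Int) := by omega
          rw [hnext, ih (pos.toNat + 1) (by omega) (by omega),
            hcongr, pvFirstFrom_step cs kw pos.toNat hc]
      · rw [ftlkB_go, if_neg (fun hx => hlt hx.2)]
        rw [hcongr, pvFirstFrom_ge cs kw pos.toNat (by omega)]

-- ===== VERDICT (by name: the statement is the Claim_ definition above) =====
theorem find_top_level_keyword_py_spec : Claim_equal_find_top_level_keyword_py := by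
  intro upper_sql keyword _
  unfold Spec_find_top_level_keyword_py find_top_level_keyword_py find_top_level_keyword_py_alt
  set cs := upper_sql.toList
  set kw := PySem.Chars.upper keyword.toList
  have hA : ftlkA_go cs kw 0 0 = pvFirstFrom cs kw 0 := by
    have := ftlkA_go_eq cs kw cs.length 0 (by omega)
    rwa [pvDepthAt_zero] at this
  have hdeps : (cs.foldl
      (fun (p : List Int × Int) ch =>
        (p.1 ++ [p.2], if ch = '(' then p.2 + 1 else if ch = ')' then p.2 - 1 else p.2))
      ([], 0)).1 = (List.range cs.length).map (fun i => pvDepthAt cs i) := by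
    rw [pvDepths_foldl]; simp
  have hB : ftlkB_go cs kw ((List.range cs.length).map (fun i => pvDepthAt cs i)) kw.length cs.length
      (cs.length + 1) (PySem.Chars.find cs kw) = pvFirstFrom cs kw 0 := by
    have := ftlkB_go_eq cs kw (cs.length + 1) 0 (by omega) (by omega)
    rwa [Nat.cast_zero, PySem.Chars.findFrom_zero] at this
  simp only [hdeps, hA, hB]
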